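-- pv_equiv track=rewrite | github.com/qcc4cp/qcc | src/subset_sum.py | tensor_diag
-- ===== SOURCE A (Python) =====
-- def tensor_diag(n: int, num: int):
--   """Construct tensor product from diagonal matrices."""
--
--   def tensor_product(w1: float, w2: float, diag):
--     # pylint: disable=g-complex-comprehension
--     return [j for i in zip([x * w1 for x in diag],
--                            [x * w2 for x in diag]) for j in i]
--
--   diag = [1, -1] if num == 0 else [1, 1]
--   for i in range(1, n):
--     if i == num:
--       diag = tensor_product(i, -i, diag)
--     else:
--       diag = tensor_product(1, 1, diag)
--   return diag
-- ===== SOURCE B (Python) =====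
-- def tensor_diag(n: int, num: int):
--   """Construct tensor product from diagonal matrices."""
--   nbits = n if n > 1 else 1
--   out = []
--   for j in range(1 << nbits):
--     val = 1
--     for i in range(nbits):
--       bit = (j >> (nbits - 1 - i)) & 1
--       if i == 0:
--         if bit == 1 and num == 0:
--           val = -val
--       elif i == num:
--         val = val * (i if bit == 0 else -i)
--     out.append(val)
--   return out
-- ===== Notes on version B (the rewrite author's own statement) =====
-- stated objective: alternative
-- what changed: Replaces the iterative doubling/interleave (repeated tensor_product passes rebuilding the whole list each step) by direct per-index evaluation: for each output index j, the value is computed from j's bit pattern in one inner pass, with no intermediate lists.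
import Mathlib
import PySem

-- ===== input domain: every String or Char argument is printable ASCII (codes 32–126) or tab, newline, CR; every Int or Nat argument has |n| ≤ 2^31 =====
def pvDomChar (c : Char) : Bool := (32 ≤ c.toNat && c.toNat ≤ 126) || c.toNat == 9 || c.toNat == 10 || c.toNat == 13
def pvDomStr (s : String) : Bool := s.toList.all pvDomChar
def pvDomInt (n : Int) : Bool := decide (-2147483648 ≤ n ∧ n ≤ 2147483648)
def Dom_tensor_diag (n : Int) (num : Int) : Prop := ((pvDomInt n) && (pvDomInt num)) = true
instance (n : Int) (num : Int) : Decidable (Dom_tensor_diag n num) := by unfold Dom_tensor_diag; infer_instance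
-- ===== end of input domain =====

-- B evaluates each diagonal entry directly from its index's bit pattern instead of
-- rebuilding the whole diagonal with an interleaving pass per qubit (objective: alternative).

-- ===== PORT A =====
def tensor_product (w1 w2 : Int) (diag : List Int) : List Int :=
  ((diag.map (fun x => x * w1)).zip (diag.map (fun x => x * w2))).flatMap
    (fun p => [p.1, p.2])

def tensor_diag (n : Int) (num : Int) : List Int :=
  (PySem.List.pyRange 1 n 1).foldl
    (fun diag i => if i = num then tensor_product i (-i) diag else tensor_product 1 1 diag)
    (if num = 0 then [1, -1] else [1, 1])

-- ===== PORT B =====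
def tensor_diag_alt (n : Int) (num : Int) : List Int :=
  let nbits : Nat := if n > 1 then n.toNat else 1
  (List.range (2 ^ nbits)).map (fun j =>
    (List.range nbits).foldl (fun val i =>
      let bit := (j >>> (nbits - 1 - i)) % 2
      if i = 0 then
        (if bit = 1 ∧ num = 0 then -val else val)
      else if (i : Int) = num then
        val * (if bit = 0 then (i : Int) else -(i : Int))
      else val) 1)

-- ===== PRECONDITION & SPEC =====
def Spec_tensor_diag (n : Int) (num : Int) (out : List Int) : Prop := out = tensor_diag_alt n num
instance (n : Int) (num : Int) (out : List Int) : Decidable (Spec_tensor_diag n num out) := by unfold Spec_tensor_diag; infer_instance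

-- ===== CLAIM (what is proved, stated in full; the proofs are below) =====
def Claim_equal_tensor_diag : Prop := ∀ (n : Int) (num : Int), Dom_tensor_diag n num → Spec_tensor_diag n num (tensor_diag n num)

-- ===== LEMMAS AND PROOFS =====

/-- The per-step factor: step `i`'s contribution to an entry whose bit at that step is `b`. -/
def pvF (num : Int) (i : Nat) (b : Nat) : Int :=
  if i = 0 then (if b = 1 ∧ num = 0 then -1 else 1)
  else if (i : Int) = num then (if b = 0 then (i : Int) else -(i : Int))
  else 1

/-- Value of entry `j` after `i` steps: the last step reads the lowest bit. -/
def pvV (num : Int) : Nat → Nat → Int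
  | 0, _ => 1
  | i + 1, j => pvV num i (j / 2) * pvF num i (j % 2)

theorem pv_interleave (w1 w2 : Int) (f : Nat → Int) :
    ∀ N : Nat, tensor_product w1 w2 ((List.range N).map f) =
      (List.range (2 * N)).map (fun j => f (j / 2) * (if j % 2 = 0 then w1 else w2)) := by
  intro N
  induction N with
  | zero => simp [tensor_product]
  | succ N ih =>
    have h2 : 2 * (N + 1) = (2 * N + 1) + 1 := by omega
    rw [List.range_succ, h2, List.range_succ, List.range_succ]
    simp only [tensor_product, List.map_append, List.map_cons, List.map_nil] at ih ⊢
    rw [List.zip_append (by simp), List.flatMap_append, ih]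
    have e1 : (2 * N + 1) / 2 = N := by omega
    have e2 : (2 * N) / 2 = N := by omega
    simp [e1, e2, Nat.mul_mod_right, List.append_assoc]

theorem pvV_base (num : Int) :
    (if num = 0 then [(1 : Int), -1] else [1, 1]) = (List.range (2 ^ 1)).map (pvV num 1) := by
  by_cases h : num = 0 <;> simp [h, pvV, pvF, List.range_succ]

/-- A's loop after steps 1..t equals the map of `pvV num (t+1)`. -/
theorem pvA_inv (num : Int) : ∀ t : Nat,
    (PySem.List.pyRange 1 (1 + (t : Int)) 1).foldl
      (fun diag i => if i = num then tensor_product i (-i) diag else tensor_product 1 1 diag)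
      (if num = 0 then [1, -1] else [1, 1])
    = (List.range (2 ^ (t + 1))).map (pvV num (t + 1)) := by
  intro t
  induction t with
  | zero =>
    have h0 : (1 + ((0 : Nat) : Int)) = 1 := by norm_num
    rw [h0, PySem.List.pyRange_one_eq_nil (le_refl 1)]
    simpa using pvV_base num
  | succ t ih =>
    have hs : (1 + ((t + 1 : Nat) : Int)) = (1 + (t : Int)) + 1 := by push_cast; ring
    rw [hs, PySem.List.pyRange_one_succ_right (by push_cast; omega), List.foldl_append]
    simp only [List.foldl_cons, List.foldl_nil, ih]
    have key : ∀ w1 w2 : Int,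
        (List.range (2 ^ (t + 2))).map
            (fun j => pvV num (t + 1) (j / 2) * (if j % 2 = 0 then w1 else w2))
          = (List.range (2 ^ (t + 2))).map (pvV num (t + 2)) →
        tensor_product w1 w2 ((List.range (2 ^ (t + 1))).map (pvV num (t + 1)))
          = (List.range (2 ^ (t + 2))).map (pvV num (t + 2)) := by
      intro w1 w2 h
      rw [pv_interleave, show 2 * 2 ^ (t + 1) = 2 ^ (t + 2) from by ring, h]
    by_cases h : (1 + (t : Int)) = num
    · rw [if_pos h]
      apply key
      apply List.map_congr_left
      intro j _
      have ht : ((t + 1 : Nat) : Int) = num := by push_cast; omega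
      have h1 : ¬ (t + 1 = 0) := by omega
      show _ = pvV num (t + 2) j
      rcases Nat.mod_two_eq_zero_or_one j with hj | hj <;>
        simp [pvV, pvF, ht, hj, ← h]
    · rw [if_neg h]
      apply key
      apply List.map_congr_left
      intro j _
      show _ = pvV num (t + 2) j
      have h1 : ¬ (t + 1 = 0) := by omega
      have ht : ¬ (((t + 1 : Nat) : Int) = num) := by push_cast at *; omega
      simp only [pvV, pvF, h1, if_false, ht]
      rcases Nat.mod_two_eq_zero_or_one j with hj | hj <;> simp [hj]

/-- B's inner bit loop computes `pvV`. -/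
theorem pvB_inner (num : Int) : ∀ (m j : Nat),
    (List.range m).foldl (fun val i =>
      let bit := (j >>> (m - 1 - i)) % 2
      if i = 0 then (if bit = 1 ∧ num = 0 then -val else val)
      else if (i : Int) = num then val * (if bit = 0 then (i : Int) else -(i : Int))
      else val) 1 = pvV num m j := by
  intro m
  induction m with
  | zero => intro j; simp [pvV]
  | succ m ih =>
    intro j
    rw [List.range_succ, List.foldl_append]
    have hshift : ∀ i, i < m → j >>> (m + 1 - 1 - i) = (j / 2) >>> (m - 1 - i) := by
      intro i hi
      have : m + 1 - 1 - i = (m - 1 - i) + 1 := by omega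
      rw [this]
      simp [Nat.shiftRight_eq_div_pow, Nat.div_div_eq_div_mul, pow_succ]
      ring_nf
    have hcongr : (List.range m).foldl (fun val i =>
        let bit := (j >>> (m + 1 - 1 - i)) % 2
        if i = 0 then (if bit = 1 ∧ num = 0 then -val else val)
        else if (i : Int) = num then val * (if bit = 0 then (i : Int) else -(i : Int))
        else val) 1 = pvV num m (j / 2) := by
      rw [PySem.List.foldl_congr_mem (g := fun val i =>
        let bit := ((j / 2) >>> (m - 1 - i)) % 2
        if i = 0 then (if bit = 1 ∧ num = 0 then -val else val)
        else if (i : Int) = num then val * (if bit = 0 then (i : Int) else -(i : Int))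
        else val)]
      · exact ih (j / 2)
      · intro acc x hx
        rw [hshift x (List.mem_range.mp hx)]
    simp only [List.foldl_cons, List.foldl_nil, hcongr]
    have hb : j >>> (m + 1 - 1 - m) = j := by simp
    show (if m = 0 then _ else _) = pvV num (m + 1) j
    by_cases hm : m = 0
    · subst hm
      rcases Nat.mod_two_eq_zero_or_one j with hj | hj <;>
        by_cases hn : num = 0 <;> simp [hj, hn, pvV, pvF]
    · simp only [pvV, pvF, hm, if_false, hb]
      by_cases hn : (m : Int) = num <;>
        rcases Nat.mod_two_eq_zero_or_one j with hj | hj <;> simp [hn, hj]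

-- ===== VERDICT (by name: the statement is the Claim_ definition above) =====
theorem tensor_diag_spec : Claim_equal_tensor_diag := by
  intro n num _
  show tensor_diag n num = tensor_diag_alt n num
  unfold tensor_diag tensor_diag_alt
  have halt : ∀ m : Nat, (List.range (2 ^ m)).map (fun j =>
      (List.range m).foldl (fun val i =>
        let bit := (j >>> (m - 1 - i)) % 2
        if i = 0 then (if bit = 1 ∧ num = 0 then -val else val)
        else if (i : Int) = num then val * (if bit = 0 then (i : Int) else -(i : Int))
        else val) 1) = (List.range (2 ^ m)).map (pvV num m) := by
    intro m
    exact List.map_congr_left (fun j _ => pvB_inner num m j)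
  by_cases h : n > 1
  · have h1 : PySem.List.pyRange 1 n 1 = PySem.List.pyRange 1 (1 + ((n.toNat - 1 : Nat) : Int)) 1 := by
      congr 1; omega
    have h2 : n.toNat - 1 + 1 = n.toNat := by omega
    rw [if_pos h, halt n.toNat, h1, pvA_inv num (n.toNat - 1), h2]
  · rw [if_neg h, halt 1, PySem.List.pyRange_one_eq_nil (by omega), List.foldl_nil]
    exact pvV_base num
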